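-- pv_equiv track=rewrite | github.com/openvinotoolkit/training_extensions | misc/pytorch_toolkit/text_recognition/text_recognition/utils/evaluator.py | postprocess_prediction
-- ===== SOURCE A (Python) =====
-- spaces = [r'\,', r'\>', r'\;', r'\:', r'\quad', r'\qquad', '~']
--
-- def ends_with_space(string):
--     """If string end with one of the latex spaces (given the above),
--     returns True and index of this space, else False and None
--
--     Args:
--         string (str): input string with possible spaces
--
--     Returns:
--         Tuple(bool, int) string ends with space, index of the space
--     """
--     for idx, space in enumerate(spaces):
--         if string.endswith(space):
--             return True, idx
--     return False, None
--
-- def postprocess_prediction(pred_phrase_str):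
--     """Deletes usual space in the end of the string and then checks
--     if string ends with latex space. If yes, deletes latex space.
--     Deletion of spaces is performed because, even though spaces in the end are invisible,
--     they affect on rendering the formula, making it more tight to the left
--
--     Args:
--         pred_phrase_str (str): input string
--
--     Returns:
--         str: postprocessed string
--     """
--     pred_phrase_str = pred_phrase_str.rstrip()
--     ends, idx = ends_with_space(pred_phrase_str)
--     while ends:
--         pred_phrase_str = pred_phrase_str[:len(pred_phrase_str) - len(spaces[idx])]
--         pred_phrase_str = pred_phrase_str.rstrip()
--         ends, idx = ends_with_space(pred_phrase_str)
--     return pred_phrase_str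
-- ===== SOURCE B (Python) =====
-- spaces = [r'\,', r'\>', r'\;', r'\:', r'\quad', r'\qquad', '~']
--
-- def postprocess_prediction(pred_phrase_str):
--     # One right-to-left pass over the reversed string: consume whitespace and
--     # latex space tokens greedily, then undo the reversal.
--     rev = pred_phrase_str[::-1]
--     i, n = 0, len(rev)
--     while i < n:
--         c = rev[i]
--         if c.isspace() or c == '~':
--             i += 1
--         elif rev.startswith('dauqq\\', i):
--             i += 6
--         elif rev.startswith('dauq\\', i):
--             i += 5
--         elif c in ',>;:' and i + 1 < n and rev[i + 1] == '\\':
--             i += 2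
--         else:
--             break
--     return rev[i:][::-1]
-- ===== Notes on version B (the rewrite author's own statement) =====
-- stated objective: alternative
-- what changed: Replaces A's fixpoint loop of repeated rstrip + linear token-list scan + re-slice with a single right-to-left pass over the reversed string that greedily consumes whitespace and latex space tokens.
import Mathlib
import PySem

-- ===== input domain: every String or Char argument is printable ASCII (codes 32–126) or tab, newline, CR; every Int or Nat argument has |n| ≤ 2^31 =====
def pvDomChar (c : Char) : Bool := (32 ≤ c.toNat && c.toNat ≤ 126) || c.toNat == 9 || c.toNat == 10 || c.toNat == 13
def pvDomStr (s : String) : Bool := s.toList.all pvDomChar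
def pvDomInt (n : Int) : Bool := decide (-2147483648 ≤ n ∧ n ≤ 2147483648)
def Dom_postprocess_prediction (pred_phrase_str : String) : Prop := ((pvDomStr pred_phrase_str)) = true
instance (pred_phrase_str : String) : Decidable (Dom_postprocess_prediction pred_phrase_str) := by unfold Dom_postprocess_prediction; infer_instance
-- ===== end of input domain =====

-- B replaces A's repeated "rstrip + scan the token list + re-slice" fixpoint loop by a single
-- right-to-left pass over the reversed character list (objective: alternative, same cost).

-- ===== PORT A =====
-- spaces = [r'\,', r'\>', r'\;', r'\:', r'\quad', r'\qquad', '~']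
def pvSpacesA : List (List Char) :=
  [['\\', ','], ['\\', '>'], ['\\', ';'], ['\\', ':'],
   ['\\', 'q', 'u', 'a', 'd'], ['\\', 'q', 'q', 'u', 'a', 'd'], ['~']]

-- 'for idx, space in enumerate(spaces): if string.endswith(space): return True, idx'
def pvEwsGo (s : List Char) : List (Int × List Char) → Bool × Option Int
  | [] => (false, none)
  | (idx, sp) :: rest =>
      if PySem.Chars.endswith s sp then (true, some idx) else pvEwsGo s rest

-- ends_with_space, on the code points
def pvEndsWithSpace (s : List Char) : Bool × Option Int :=
  pvEwsGo s (PySem.List.enumerate pvSpacesA)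

-- the 'while ends:' loop; fuel is only a totality guard (length+1 always suffices, see proofs)
def pvLoopA : Nat → List Char → List Char
  | 0, s => s
  | fuel + 1, s =>
      match pvEndsWithSpace s with
      | (true, some idx) =>
          pvLoopA fuel (PySem.Chars.rstrip (PySem.Chars.slice s none
            (some ((s.length : Int) - ((pvSpacesA.getD idx.toNat []).length : Int)))))
      | _ => s

def postprocess_prediction (pred_phrase_str : String) : String :=
  let t := PySem.Chars.rstrip pred_phrase_str.toList
  String.ofList (pvLoopA (t.length + 1) t)

-- ===== PORT B =====
-- the 'while i < n' consumption loop of Source B, on the reversed code points (index i ≙ dropped prefix)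
def pvConsumeB : List Char → List Char
  | [] => []
  | c :: rest =>
      if PySem.Chars.isspace c || c == '~' then pvConsumeB rest
      else if PySem.Chars.startswith (c :: rest) ['d', 'a', 'u', 'q', 'q', '\\'] then
        pvConsumeB ((c :: rest).drop 6)
      else if PySem.Chars.startswith (c :: rest) ['d', 'a', 'u', 'q', '\\'] then
        pvConsumeB ((c :: rest).drop 5)
      else if (c == ',' || c == '>' || c == ';' || c == ':') && ((c :: rest)[1]? == some '\\') then
        pvConsumeB ((c :: rest).drop 2)
      else c :: rest
  termination_by r => r.length
  decreasing_by all_goals simp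

def postprocess_prediction_alt (pred_phrase_str : String) : String :=
  String.ofList ((pvConsumeB pred_phrase_str.toList.reverse).reverse)

-- ===== PRECONDITION & SPEC =====
def Spec_postprocess_prediction (pred_phrase_str : String) (out : String) : Prop := out = postprocess_prediction_alt pred_phrase_str
instance (pred_phrase_str : String) (out : String) : Decidable (Spec_postprocess_prediction pred_phrase_str out) := by unfold Spec_postprocess_prediction; infer_instance

-- ===== CLAIM (what is proved, stated in full; the proofs are below) =====
def Claim_equal_postprocess_prediction : Prop := ∀ (pred_phrase_str : String), Dom_postprocess_prediction pred_phrase_str → Spec_postprocess_prediction pred_phrase_str (postprocess_prediction pred_phrase_str)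

-- ===== LEMMAS AND PROOFS =====

theorem pv_ews_rev (s p : List Char) :
    PySem.Chars.endswith s.reverse p = PySem.Chars.startswith s p.reverse := by
  simp only [PySem.Chars.endswith, PySem.Chars.startswith]
  rw [Bool.eq_iff_iff]
  simp [List.isSuffixOf, List.isPrefixOf_iff_prefix]

theorem pv_ews_go_unfold (x : List Char) :
    pvEndsWithSpace x =
      (if PySem.Chars.endswith x ['\\', ','] then (true, some 0)
       else if PySem.Chars.endswith x ['\\', '>'] then (true, some 1)
       else if PySem.Chars.endswith x ['\\', ';'] then (true, some 2)
       else if PySem.Chars.endswith x ['\\', ':'] then (true, some 3)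
       else if PySem.Chars.endswith x ['\\', 'q', 'u', 'a', 'd'] then (true, some 4)
       else if PySem.Chars.endswith x ['\\', 'q', 'q', 'u', 'a', 'd'] then (true, some 5)
       else if PySem.Chars.endswith x ['~'] then (true, some 6)
       else (false, none)) := rfl

theorem pv_ews_unfold (s : List Char) :
    pvEndsWithSpace s.reverse =
      (if PySem.Chars.startswith s [',', '\\'] then (true, some 0)
       else if PySem.Chars.startswith s ['>', '\\'] then (true, some 1)
       else if PySem.Chars.startswith s [';', '\\'] then (true, some 2)
       else if PySem.Chars.startswith s [':', '\\'] then (true, some 3)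
       else if PySem.Chars.startswith s ['d', 'a', 'u', 'q', '\\'] then (true, some 4)
       else if PySem.Chars.startswith s ['d', 'a', 'u', 'q', 'q', '\\'] then (true, some 5)
       else if PySem.Chars.startswith s ['~'] then (true, some 6)
       else (false, none)) := by
  rw [pv_ews_go_unfold]
  simp only [pv_ews_rev]
  rfl

theorem pv_rstrip_rev (cs : List Char) :
    PySem.Chars.rstrip cs = (cs.reverse.dropWhile PySem.Chars.isspace).reverse := by
  simp [PySem.Chars.rstrip]

theorem pv_slice_step (lit t : List Char) :
    PySem.Chars.rstrip (PySem.Chars.slice (lit ++ t).reverse none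
      (some (((lit ++ t).reverse.length : Int) - (lit.length : Int)))) =
    (t.dropWhile PySem.Chars.isspace).reverse := by
  have hlen : ((lit ++ t).reverse.length : Int) - (lit.length : Int) = ((t.length : Nat) : Int) := by
    simp
  rw [hlen]
  simp only [PySem.Chars.slice_eq_listSlice, PySem.List.slice_to_natCast]
  rw [List.reverse_append, List.take_left' (by simp)]
  rw [pv_rstrip_rev]
  simp

theorem pv_consume_dropWhile (r : List Char) :
    pvConsumeB (r.dropWhile PySem.Chars.isspace) = pvConsumeB r := by
  induction r with
  | nil => rfl
  | cons c rest ih =>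
      by_cases h : PySem.Chars.isspace c
      · rw [List.dropWhile_cons_of_pos h, ih]
        conv_rhs => rw [pvConsumeB]
        simp [h]
      · rw [List.dropWhile_cons_of_neg h]

theorem pv_main : ∀ (fuel : Nat) (r : List Char), r.length < fuel →
    r.dropWhile PySem.Chars.isspace = r →
    pvLoopA fuel r.reverse = (pvConsumeB r).reverse := by
  intro fuel
  induction fuel with
  | zero => intro r h; omega
  | succ fuel ih =>
      intro r hlen hws
      have step : ∀ lit t : List Char, r = lit ++ t → 0 < lit.length →
          pvLoopA fuel (PySem.Chars.rstrip (PySem.Chars.slice r.reverse none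
            (some ((r.reverse.length : Int) - (lit.length : Int))))) = (pvConsumeB t).reverse := by
        intro lit t hr hpos
        subst hr
        rw [pv_slice_step]
        have hd := List.length_dropWhile_le (p := PySem.Chars.isspace) (l := t)
        have h1 : (t.dropWhile PySem.Chars.isspace).length < fuel := by
          simp at hlen; omega
        rw [ih _ h1 (List.dropWhile_idempotent _ _)]
        rw [pv_consume_dropWhile]
      match r, hws, hlen with
      | [], _, _ =>
        simp only [List.reverse_nil]
        rw [pvLoopA, pv_ews_go_unfold]
        simp [pvConsumeB, PySem.Chars.endswith, List.isSuffixOf]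
      | c :: rest, hws, hlen =>
        have hc : ¬ PySem.Chars.isspace c = true := by
          intro h
          rw [List.dropWhile_cons_of_pos h] at hws
          have h2 := congrArg List.length hws
          have h3 := List.length_dropWhile_le (p := PySem.Chars.isspace) (l := rest)
          simp at h2; omega
        conv_rhs => rw [pvConsumeB]
        simp only [hc, Bool.false_or]
        rw [pvLoopA, pv_ews_unfold]
        by_cases h6 : c = '~'
        · subst h6
          simp only [PySem.Chars.startswith, List.isPrefixOf]
          norm_num
          simpa [pvSpacesA] using step ['~'] rest rfl (by simp)
        · by_cases hqq : PySem.Chars.startswith (c :: rest) ['d', 'a', 'u', 'q', 'q', '\\'] = true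
          · -- the string ends with '\\qquad'
            obtain ⟨t, ht⟩ := (PySem.Chars.startswith_iff _ _).1 hqq
            obtain ⟨rfl, rfl⟩ := List.cons.inj
              (show 'd' :: ('a' :: 'u' :: 'q' :: 'q' :: '\\' :: t) = c :: rest from ht)
            simp only [PySem.Chars.startswith, List.isPrefixOf]
            norm_num
            simpa [pvSpacesA] using step ['d', 'a', 'u', 'q', 'q', '\\'] t rfl (by simp)
          · by_cases hq : PySem.Chars.startswith (c :: rest) ['d', 'a', 'u', 'q', '\\'] = true
            · -- the string ends with '\\quad' (and not '\\qquad')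
              obtain ⟨t, ht⟩ := (PySem.Chars.startswith_iff _ _).1 hq
              obtain ⟨rfl, rfl⟩ := List.cons.inj
                (show 'd' :: ('a' :: 'u' :: 'q' :: '\\' :: t) = c :: rest from ht)
              simp only [PySem.Chars.startswith, List.isPrefixOf] at hqq ⊢
              norm_num at hqq ⊢
              simpa [pvSpacesA] using step ['d', 'a', 'u', 'q', '\\'] t rfl (by simp)
            · by_cases hcm : ((c == ',' || c == '>' || c == ';' || c == ':') && ((c :: rest)[1]? == some '\\')) = true
              · -- the string ends with one of '\\,' '\\>' '\\;' '\\:'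
                obtain ⟨hcs, hb⟩ := Bool.and_eq_true_iff.mp hcm
                obtain ⟨r1, rfl⟩ : ∃ r1, rest = '\\' :: r1 := by
                  cases rest with
                  | nil => simp at hb
                  | cons a b => simp at hb; exact ⟨b, by rw [hb]⟩
                simp only [Bool.or_eq_true, beq_iff_eq] at hcs
                rcases hcs with ((rfl | rfl) | rfl) | rfl <;>
                  · simp only [PySem.Chars.startswith, List.isPrefixOf]
                    norm_num
                    simpa [pvSpacesA] using step [_, '\\'] r1 rfl (by simp)
              · -- no latex space token at the end: both sides keep the string
                have hcm' : ((c == ',' || c == '>' || c == ';' || c == ':') && ((c :: rest)[1]? == some '\\')) = false :=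
                  Bool.eq_false_iff.mpr hcm
                have h2 : ∀ x : Char, x = ',' ∨ x = '>' ∨ x = ';' ∨ x = ':' →
                    PySem.Chars.startswith (c :: rest) [x, '\\'] = false := by
                  intro x hx
                  simp only [PySem.Chars.startswith, List.isPrefixOf_cons₂]
                  by_cases hcx : x == c
                  · have hxc : c = x := (beq_iff_eq.mp hcx).symm
                    subst hxc
                    have hcs : (c == ',' || c == '>' || c == ';' || c == ':') = true := by
                      rcases hx with rfl | rfl | rfl | rfl <;> simp
                    have hb : ((c :: rest)[1]? == some '\\') = false := by
                      rcases Bool.and_eq_false_iff.mp hcm' with h | h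
                      · rw [hcs] at h; cases h
                      · exact h
                    cases rest with
                    | nil => simp [List.isPrefixOf]
                    | cons a b =>
                        simp only [List.getElem?_cons_succ, List.getElem?_cons_zero] at hb
                        simp only [List.isPrefixOf]
                        simp at hb ⊢
                        intro h'
                        exact hb h'.symm
                  · simp [hcx]
                simp only [Bool.not_eq_true] at hqq hq
                rw [h2 ',' (Or.inl rfl), h2 '>' (Or.inr (Or.inl rfl)),
                    h2 ';' (Or.inr (Or.inr (Or.inl rfl))), h2 ':' (Or.inr (Or.inr (Or.inr rfl))),
                    hq, hqq,
                    show PySem.Chars.startswith (c :: rest) ['~'] = false by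
                      simp only [PySem.Chars.startswith, List.isPrefixOf,
                        Bool.and_true, beq_eq_false_iff_ne]
                      exact fun hh => h6 hh.symm,
                    hcm']
                simp [h6]


-- ===== VERDICT (by name: the statement is the Claim_ definition above) =====
theorem postprocess_prediction_spec : Claim_equal_postprocess_prediction := by
  intro s _
  show postprocess_prediction s = postprocess_prediction_alt s
  unfold postprocess_prediction postprocess_prediction_alt
  rw [pv_rstrip_rev]
  show String.ofList (pvLoopA _ (List.dropWhile PySem.Chars.isspace s.toList.reverse).reverse) = _
  rw [show ((List.dropWhile PySem.Chars.isspace s.toList.reverse).reverse.length + 1 : Nat)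
        = (List.dropWhile PySem.Chars.isspace s.toList.reverse).length + 1 by simp]
  rw [pv_main _ _ (by omega) (List.dropWhile_idempotent _ _), pv_consume_dropWhile]
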